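-- pv_equiv track=rewrite | github.com/Yusful33/sa-call-analyzer | main.py | _industry_heuristic
-- ===== SOURCE A (Python) =====
-- def _industry_heuristic(industry: str | None) -> str:
--     """Fallback: infer demo use case from Salesforce industry field."""
--     if not industry:
--         return "generic"
--
--     industry_lower = industry.lower()
--     if any(k in industry_lower for k in ["financial", "banking", "insurance", "fintech",
--                                           "data", "analytics", "intelligence", "research"]):
--         return "text-to-sql-bi-agent"
--     elif any(k in industry_lower for k in ["healthcare", "pharma", "biotech", "medical"]):
--         return "multimodal-ai"
--     elif any(k in industry_lower for k in ["manufacturing", "automotive", "industrial"]):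
--         return "multimodal-ai"
--     elif any(k in industry_lower for k in ["retail", "ecommerce", "e-commerce"]):
--         return "classification-routing"
--     elif any(k in industry_lower for k in ["technology", "software", "saas", "ai"]):
--         return "multi-agent-orchestration"
--     elif any(k in industry_lower for k in ["consulting", "professional services"]):
--         return "multi-agent-orchestration"
--     elif any(k in industry_lower for k in ["media", "entertainment", "gaming"]):
--         return "retrieval-augmented-search"
--     elif any(k in industry_lower for k in ["telecom", "communications"]):
--         return "classification-routing"
--     elif any(k in industry_lower for k in ["travel", "hospitality", "tourism", "leisure", "airline", "hotel"]):
--         return "travel-agent"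
--     else:
--         return "retrieval-augmented-search"
-- ===== SOURCE B (Python) =====
-- # Different strategy: flat keyword -> rule-priority map; take the MINIMUM priority
-- # among all keywords that occur (instead of an ordered first-match elif chain),
-- # then look the category up by priority index.
-- _KEYWORD_RULE = {
--     "financial": 0, "banking": 0, "insurance": 0, "fintech": 0,
--     "data": 0, "analytics": 0, "intelligence": 0, "research": 0,
--     "healthcare": 1, "pharma": 1, "biotech": 1, "medical": 1,
--     "manufacturing": 2, "automotive": 2, "industrial": 2,
--     "retail": 3, "ecommerce": 3, "e-commerce": 3,
--     "technology": 4, "software": 4, "saas": 4, "ai": 4,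
--     "consulting": 5, "professional services": 5,
--     "media": 6, "entertainment": 6, "gaming": 6,
--     "telecom": 7, "communications": 7,
--     "travel": 8, "hospitality": 8, "tourism": 8, "leisure": 8,
--     "airline": 8, "hotel": 8,
-- }
--
-- _CATEGORIES = [
--     "text-to-sql-bi-agent",
--     "multimodal-ai",
--     "multimodal-ai",
--     "classification-routing",
--     "multi-agent-orchestration",
--     "multi-agent-orchestration",
--     "retrieval-augmented-search",
--     "classification-routing",
--     "travel-agent",
-- ]
--
--
-- def _industry_heuristic(industry):
--     """Fallback: infer demo use case from Salesforce industry field."""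
--     if not industry:
--         return "generic"
--     industry_lower = industry.lower()
--     best = min((rule for keyword, rule in _KEYWORD_RULE.items()
--                 if keyword in industry_lower), default=None)
--     if best is None:
--         return "retrieval-augmented-search"
--     return _CATEGORIES[best]
-- ===== Notes on version B (the rewrite author's own statement) =====
-- stated objective: alternative
-- what changed: Replaces the ordered if/elif first-match chain by a flat keyword-to-priority map: B computes the minimum priority over ALL matching keywords (no short-circuit order) and indexes a category table with it.
import Mathlib
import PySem

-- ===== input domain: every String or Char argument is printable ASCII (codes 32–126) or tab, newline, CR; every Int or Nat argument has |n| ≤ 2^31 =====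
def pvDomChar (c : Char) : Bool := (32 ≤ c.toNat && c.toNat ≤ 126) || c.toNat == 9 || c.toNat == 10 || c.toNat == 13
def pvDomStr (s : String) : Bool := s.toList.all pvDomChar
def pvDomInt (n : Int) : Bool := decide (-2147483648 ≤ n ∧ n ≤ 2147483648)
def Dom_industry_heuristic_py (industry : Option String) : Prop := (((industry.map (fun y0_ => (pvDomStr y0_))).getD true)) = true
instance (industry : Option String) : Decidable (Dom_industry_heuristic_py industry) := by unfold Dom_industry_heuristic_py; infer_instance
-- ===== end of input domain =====

-- B replaces the ordered if/elif chain by a flat keyword->priority map: it takes the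
-- MINIMUM priority over all matching keywords and indexes a category table (alternative).

-- ===== PORT A =====
-- literal transliteration of the if/elif chain; `not industry` is none or ""
def industry_heuristic_py (industry : Option String) : String :=
  match industry with
  | none => "generic"
  | some s =>
    if s = "" then "generic"
    else
      let il := PySem.Str.lower s
      if ["financial", "banking", "insurance", "fintech", "data", "analytics",
          "intelligence", "research"].any (fun k => PySem.Str.isIn k il) then
        "text-to-sql-bi-agent"
      else if ["healthcare", "pharma", "biotech", "medical"].any (fun k => PySem.Str.isIn k il) then
        "multimodal-ai"
      else if ["manufacturing", "automotive", "industrial"].any (fun k => PySem.Str.isIn k il) then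
        "multimodal-ai"
      else if ["retail", "ecommerce", "e-commerce"].any (fun k => PySem.Str.isIn k il) then
        "classification-routing"
      else if ["technology", "software", "saas", "ai"].any (fun k => PySem.Str.isIn k il) then
        "multi-agent-orchestration"
      else if ["consulting", "professional services"].any (fun k => PySem.Str.isIn k il) then
        "multi-agent-orchestration"
      else if ["media", "entertainment", "gaming"].any (fun k => PySem.Str.isIn k il) then
        "retrieval-augmented-search"
      else if ["telecom", "communications"].any (fun k => PySem.Str.isIn k il) then
        "classification-routing"
      else if ["travel", "hospitality", "tourism", "leisure", "airline",
               "hotel"].any (fun k => PySem.Str.isIn k il) then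
        "travel-agent"
      else
        "retrieval-augmented-search"

-- ===== PORT B =====
-- Source B's flat keyword -> priority dict, in insertion order
def pvKeywordRule : List (String × Nat) :=
  [ ("financial", 0), ("banking", 0), ("insurance", 0), ("fintech", 0),
    ("data", 0), ("analytics", 0), ("intelligence", 0), ("research", 0),
    ("healthcare", 1), ("pharma", 1), ("biotech", 1), ("medical", 1),
    ("manufacturing", 2), ("automotive", 2), ("industrial", 2),
    ("retail", 3), ("ecommerce", 3), ("e-commerce", 3),
    ("technology", 4), ("software", 4), ("saas", 4), ("ai", 4),
    ("consulting", 5), ("professional services", 5),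
    ("media", 6), ("entertainment", 6), ("gaming", 6),
    ("telecom", 7), ("communications", 7),
    ("travel", 8), ("hospitality", 8), ("tourism", 8), ("leisure", 8),
    ("airline", 8), ("hotel", 8) ]

def pvCategories : List String :=
  [ "text-to-sql-bi-agent", "multimodal-ai", "multimodal-ai",
    "classification-routing", "multi-agent-orchestration",
    "multi-agent-orchestration", "retrieval-augmented-search",
    "classification-routing", "travel-agent" ]

-- Python's min(gen, default=None): running minimum as an Option Nat
def pvMergeMin : Option Nat → Nat → Option Nat
  | none, i => some i
  | some m, i => some (min m i)

def industry_heuristic_py_alt (industry : Option String) : String :=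
  match industry with
  | none => "generic"
  | some s =>
    if s = "" then "generic"
    else
      let il := PySem.Str.lower s
      let best := pvKeywordRule.foldl
        (fun acc ki => if PySem.Str.isIn ki.1 il then pvMergeMin acc ki.2 else acc) none
      match best with
      | none => "retrieval-augmented-search"
      | some i => pvCategories.getD i "retrieval-augmented-search"

-- ===== PRECONDITION & SPEC =====
def Spec_industry_heuristic_py (industry : Option String) (out : String) : Prop := out = industry_heuristic_py_alt industry
instance (industry : Option String) (out : String) : Decidable (Spec_industry_heuristic_py industry out) := by unfold Spec_industry_heuristic_py; infer_instance

-- ===== CLAIM (what is proved, stated in full; the proofs are below) =====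
def Claim_equal_industry_heuristic_py : Prop := ∀ (industry : Option String), Dom_industry_heuristic_py industry → Spec_industry_heuristic_py industry (industry_heuristic_py industry)

-- ===== LEMMAS AND PROOFS =====

-- folding the min accumulator over one keyword group (all priorities = i)
theorem pv_fold_group (il : String) (i : Nat) (l : List String) (acc : Option Nat) :
    (l.map (fun k => (k, i))).foldl
      (fun acc ki => if PySem.Str.isIn ki.1 il then pvMergeMin acc ki.2 else acc) acc
    = if l.any (fun k => PySem.Str.isIn k il) then pvMergeMin acc i else acc := by
  induction l generalizing acc with
  | nil => simp
  | cons k t ih =>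
    simp only [List.map_cons, List.foldl_cons, List.any_cons]
    by_cases hk : PySem.Str.isIn k il = true
    · rw [if_pos hk, ih]
      simp only [hk, Bool.true_or, if_true]
      by_cases ht : (t.any fun k => PySem.Str.isIn k il) = true
      · rw [if_pos ht]
        cases acc <;> simp [pvMergeMin]
      · rw [if_neg ht]
    · rw [if_neg hk, ih]
      rw [Bool.not_eq_true] at hk
      simp only [hk, Bool.false_or]

-- the flat dict is the concatenation of the nine keyword groups
theorem pv_rules_split :
    pvKeywordRule =
      (["financial", "banking", "insurance", "fintech", "data", "analytics",
        "intelligence", "research"].map (fun k => (k, 0)))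
      ++ (["healthcare", "pharma", "biotech", "medical"].map (fun k => (k, 1)))
      ++ (["manufacturing", "automotive", "industrial"].map (fun k => (k, 2)))
      ++ (["retail", "ecommerce", "e-commerce"].map (fun k => (k, 3)))
      ++ (["technology", "software", "saas", "ai"].map (fun k => (k, 4)))
      ++ (["consulting", "professional services"].map (fun k => (k, 5)))
      ++ (["media", "entertainment", "gaming"].map (fun k => (k, 6)))
      ++ (["telecom", "communications"].map (fun k => (k, 7)))
      ++ (["travel", "hospitality", "tourism", "leisure", "airline",
           "hotel"].map (fun k => (k, 8))) := by rfl

-- ===== VERDICT (by name: the statement is the Claim_ definition above) =====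
set_option maxHeartbeats 4000000 in
theorem industry_heuristic_py_spec : Claim_equal_industry_heuristic_py := by
  intro industry _
  unfold Spec_industry_heuristic_py industry_heuristic_py industry_heuristic_py_alt
  cases industry with
  | none => rfl
  | some s =>
    dsimp only
    by_cases h : s = ""
    · rw [if_pos h, if_pos h]
    · rw [if_neg h, if_neg h]
      rw [pv_rules_split]
      simp only [List.foldl_append, pv_fold_group]
      generalize (["financial", "banking", "insurance", "fintech", "data", "analytics",
          "intelligence", "research"].any fun k => PySem.Str.isIn k (PySem.Str.lower s)) = b0
      generalize (["healthcare", "pharma", "biotech", "medical"].any fun k =>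
          PySem.Str.isIn k (PySem.Str.lower s)) = b1
      generalize (["manufacturing", "automotive", "industrial"].any fun k =>
          PySem.Str.isIn k (PySem.Str.lower s)) = b2
      generalize (["retail", "ecommerce", "e-commerce"].any fun k =>
          PySem.Str.isIn k (PySem.Str.lower s)) = b3
      generalize (["technology", "software", "saas", "ai"].any fun k =>
          PySem.Str.isIn k (PySem.Str.lower s)) = b4
      generalize (["consulting", "professional services"].any fun k =>
          PySem.Str.isIn k (PySem.Str.lower s)) = b5
      generalize (["media", "entertainment", "gaming"].any fun k =>
          PySem.Str.isIn k (PySem.Str.lower s)) = b6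
      generalize (["telecom", "communications"].any fun k =>
          PySem.Str.isIn k (PySem.Str.lower s)) = b7
      generalize (["travel", "hospitality", "tourism", "leisure", "airline",
          "hotel"].any fun k => PySem.Str.isIn k (PySem.Str.lower s)) = b8
      cases b0 <;> cases b1 <;> cases b2 <;> cases b3 <;> cases b4 <;>
        cases b5 <;> cases b6 <;> cases b7 <;> cases b8 <;> rfl
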